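-- pv_equiv track=rewrite | github.com/Spinjala1/CSC-520-LABS-AND-HWs | L0604/L0604b-template.py | L0604b
-- ===== SOURCE A (Python) =====
-- def L0604b(inString):
--     # Split the input string into individual elements
--     elements = inString.split()
--
--     # Initialize variables to keep track of positive integers and the sum
--     positive_int_sum = 0
--     has_positive_int = False
--
--     # Iterate through each element in the input string
--     for element in elements:
--         try:
--             num = int(element)
--             if num > 0:
--                 positive_int_sum += num
--                 has_positive_int = True
--         except ValueError:
--             return 'no'  # If any element is not a valid integer, return 'no'
--
--     if not has_positive_int:
--         return 'no'  # If no positive integers are found, return 'no'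
--
--     return str(positive_int_sum % 2)  # Return the sum of positive integers modulo 2
-- ===== SOURCE B (Python) =====
-- def L0604b(inString):
--     try:
--         nums = [int(e) for e in inString.split()]
--     except ValueError:
--         return 'no'
--     if max(nums, default=0) <= 0:
--         return 'no'
--     return str(len([n for n in nums if n > 0 and n % 2 == 1]) % 2)
-- ===== Notes on version B (the rewrite author's own statement) =====
-- stated objective: alternative
-- what changed: B never maintains A's running sum or has_positive flag: it validates all tokens up front, decides positivity with max(nums, default=0), and computes the answer as the parity of the COUNT of odd positive tokens (equal to the parity of the sum of positives).
import Mathlib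
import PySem

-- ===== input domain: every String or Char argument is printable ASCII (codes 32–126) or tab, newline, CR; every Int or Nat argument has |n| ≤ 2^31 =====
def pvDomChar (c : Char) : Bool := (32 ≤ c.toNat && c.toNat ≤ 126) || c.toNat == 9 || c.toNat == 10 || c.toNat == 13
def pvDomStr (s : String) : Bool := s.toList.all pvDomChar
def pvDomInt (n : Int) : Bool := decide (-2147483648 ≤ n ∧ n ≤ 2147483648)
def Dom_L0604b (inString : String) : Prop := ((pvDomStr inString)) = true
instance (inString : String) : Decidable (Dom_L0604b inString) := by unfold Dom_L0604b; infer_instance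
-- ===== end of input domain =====

-- B drops A's running sum: it validates all tokens up front, tests positivity with max(nums, default=0),
-- and returns the parity of the COUNT of odd positive tokens (equal to the parity of the sum of positives); objective: alternative.

-- ===== PORT A =====
-- A's loop: state (positive_int_sum, has_positive_int), early return 'no' on ValueError.
def L0604bGoA : List String → Int → Bool → String
  | [], s, hp => if hp = false then "no" else PySem.Int.toStr (PySem.Int.mod s 2)
  | e :: rest, s, hp =>
    match PySem.Int.ofStr? e with
    | none => "no"
    | some num =>
      if num > 0 then L0604bGoA rest (s + num) true
      else L0604bGoA rest s hp

def L0604b (inString : String) : String :=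
  L0604bGoA (PySem.Str.split₀ inString) 0 false

-- ===== PORT B =====
def L0604b_alt (inString : String) : String :=
  match (PySem.Str.split₀ inString).mapM PySem.Int.ofStr? with
  | none => "no"
  | some nums =>
    if (PySem.List.max? nums (fun x => x)).getD 0 ≤ 0 then "no"
    else PySem.Int.toStr (PySem.Int.mod ((nums.filter (fun n => n > 0 ∧ n % 2 = 1)).length : Int) 2)

-- ===== PRECONDITION & SPEC =====
def Spec_L0604b (inString : String) (out : String) : Prop := out = L0604b_alt inString
instance (inString : String) (out : String) : Decidable (Spec_L0604b inString out) := by unfold Spec_L0604b; infer_instance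

-- ===== CLAIM (what is proved, stated in full; the proofs are below) =====
def Claim_equal_L0604b : Prop := ∀ (inString : String), Dom_L0604b inString → Spec_L0604b inString (L0604b inString)

-- ===== LEMMAS AND PROOFS =====
-- A's loop in closed form over the parsed list.
lemma L0604bGoA_char : ∀ (ts : List String) (s : Int) (hp : Bool),
    L0604bGoA ts s hp =
      match ts.mapM PySem.Int.ofStr? with
      | none => "no"
      | some nums =>
        let pos := nums.filter (fun n => n > 0)
        if hp = false ∧ pos = [] then "no"
        else PySem.Int.toStr (PySem.Int.mod (s + pos.sum) 2)
  | [], s, hp => by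
    cases hp <;> simp [L0604bGoA, List.mapM_nil]
  | e :: rest, s, hp => by
    unfold L0604bGoA
    cases h : PySem.Int.ofStr? e with
    | none => simp [List.mapM_cons, h]
    | some num =>
      dsimp only
      by_cases hpos : num > 0
      · rw [if_pos hpos, L0604bGoA_char rest (s + num) true]
        simp only [List.mapM_cons, h, Option.bind_eq_bind]
        cases hm : rest.mapM PySem.Int.ofStr? with
        | none => simp
        | some nums =>
          have hn : ¬ num ≤ 0 := by omega
          simp [hpos, add_assoc]
      · rw [if_neg hpos, L0604bGoA_char rest s hp]
        simp only [List.mapM_cons, h, Option.bind_eq_bind]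
        cases hm : rest.mapM PySem.Int.ofStr? with
        | none => simp
        | some nums => simp [hpos]

-- max(nums, default=0) ≤ 0 iff there is no positive element.
lemma foldl_max_nonpos (t : List Int) : ∀ (x : Int), x ≤ 0 → (∀ n ∈ t, n ≤ 0) → t.foldl max x ≤ 0 := by
  induction t with
  | nil => intro x hx _; exact hx
  | cons y t ih =>
    intro x hx ht
    simp only [List.foldl_cons]
    refine ih (max x y) ?_ (fun n hn => ht n (List.mem_cons_of_mem y hn))
    have := ht y (List.mem_cons_self)
    omega

lemma max_le_iff_no_pos : ∀ (nums : List Int),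
    ((PySem.List.max? nums (fun x => x)).getD 0 ≤ 0) ↔ nums.filter (fun n => n > 0) = []
  | [] => by simp [PySem.List.max?]
  | x :: t => by
    rw [PySem.List.max?_id_cons]
    simp only [Option.getD_some, List.filter_eq_nil_iff]
    constructor
    · intro h n hn
      have hm := PySem.List.le_foldl_max t x
      have : n ≤ t.foldl max x := by
        rcases List.mem_cons.mp hn with hx | hn'
        · exact hx ▸ hm.1
        · exact hm.2 n hn'
      simp only [decide_eq_true_eq]; omega
    · intro h
      have hx : x ≤ 0 := by have := h x (by simp); simpa using this
      exact foldl_max_nonpos t x hx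
        (fun n hn => by have := h n (List.mem_cons_of_mem x hn); simpa using this)

-- parity of the sum of positives = parity of the count of odd positives.
lemma sum_parity_count : ∀ (nums : List Int),
    (nums.filter (fun n => n > 0)).sum % 2
      = ((nums.filter (fun n => n > 0 ∧ n % 2 = 1)).length : Int) % 2
  | [] => by simp
  | x :: t => by
    have ih := sum_parity_count t
    rcases lt_or_ge 0 x with hx | hx
    · rw [List.filter_cons_of_pos (by simpa using hx)]
      by_cases ho : x % 2 = 1
      · rw [List.filter_cons_of_pos (by simp [hx, ho])]
        simp only [List.sum_cons, List.length_cons]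
        push_cast
        omega
      · rw [List.filter_cons_of_neg (by simp [ho])]
        simp only [List.sum_cons]
        omega
    · rw [List.filter_cons_of_neg (by simp; omega), List.filter_cons_of_neg (by simp; omega)]
      exact ih

-- ===== VERDICT (by name: the statement is the Claim_ definition above) =====
theorem L0604b_spec : Claim_equal_L0604b := by
  intro inString _
  unfold Spec_L0604b L0604b L0604b_alt
  rw [L0604bGoA_char]
  cases hm : (PySem.Str.split₀ inString).mapM PySem.Int.ofStr? with
  | none => rfl
  | some nums =>
    by_cases hp : nums.filter (fun n => n > 0) = []
    · simp [hp, (max_le_iff_no_pos nums).mpr hp]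
    · have hmax : ¬ ((PySem.List.max? nums (fun x => x)).getD 0 ≤ 0) := by
        rw [max_le_iff_no_pos]; exact hp
      simp only [hp, and_false, if_false, hmax, zero_add]
      have hs := sum_parity_count nums
      have hm2 : ∀ a : Int, a.fmod 2 = a % 2 := fun a => by simp [Int.fmod_eq_emod]
      simp only [PySem.Int.mod, hm2, Bool.decide_and, gt_iff_lt] at hs ⊢
      rw [hs]
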